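-- pv_equiv track=rewrite | github.com/Deepthi-Vemula/scaler-python | 14-subsequences/homework/oddEvensubsequences.py | solve
-- ===== SOURCE A (Python) =====
-- def solve(A):
--     n, ans, i = len(A), 1, 1
--     val = A[0]
--     while i < n:
--         if val%2 == 0 :
--             while i < n and A[i]%2 == 0:
--                 i += 1
--             if i < n and A[i]%2 == 1:
--                 ans += 1
--                 val = A[i]
--         else:
--             while i < n and A[i]%2 == 1:
--                 i += 1
--             if i < n and A[i]%2 == 0:
--                 ans += 1
--                 val = A[i]
--     return ans
-- ===== SOURCE B (Python) =====
-- def solve(A):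
--     return 1 + sum(1 for x, y in zip(A, A[1:]) if x % 2 != y % 2)
-- ===== Notes on version B (the rewrite author's own statement) =====
-- stated objective: simpler
-- what changed: Replaces A's stateful run-skipping nested while-loops (tracking a parity anchor and manual index advances) with a single expression counting adjacent parity changes over zipped neighbour pairs and adding 1.
import Mathlib
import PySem

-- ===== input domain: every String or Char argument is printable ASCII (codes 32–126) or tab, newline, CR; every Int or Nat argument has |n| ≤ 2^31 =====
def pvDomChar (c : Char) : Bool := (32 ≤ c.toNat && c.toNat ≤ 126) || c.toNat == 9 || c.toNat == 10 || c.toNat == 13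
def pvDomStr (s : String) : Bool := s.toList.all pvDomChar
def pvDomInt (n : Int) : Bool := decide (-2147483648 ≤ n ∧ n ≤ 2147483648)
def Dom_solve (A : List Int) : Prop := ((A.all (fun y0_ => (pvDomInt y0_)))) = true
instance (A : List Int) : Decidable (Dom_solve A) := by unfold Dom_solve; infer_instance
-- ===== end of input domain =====

-- B replaces A's nested run-skipping while-loops with one flat count of adjacent
-- parity changes plus 1 (objective: simpler). A raises IndexError on the empty list, excluded by Pre_.

-- ===== PORT A =====
-- inner 'while i < n and A[i]%2 == par: i += 1' (par = 0 resp. 1)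
def skipA (A : List Int) (par : Int) (i : Int) : Int :=
  if h : i < (A.length : Int) ∧ PySem.Int.mod (PySem.List.pyGetD A i 0) 2 = par then
    skipA A par (i + 1)
  else i
termination_by ((A.length : Int) - i).toNat
decreasing_by omega

-- PySem.Int.mod x 2 ∈ {0, 1}
theorem pvMod2 (x : Int) : PySem.Int.mod x 2 = 0 ∨ PySem.Int.mod x 2 = 1 := by
  have h1 := PySem.Int.mod_nonneg x (b := 2) (by omega)
  have h2 := PySem.Int.mod_lt x (b := 2) (by omega)
  omega

theorem skipA_ge (A : List Int) (par : Int) (i : Int) : i ≤ skipA A par i := by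
  fun_induction skipA with
  | case1 i h ih => omega
  | case2 i h => omega

theorem skipA_stop (A : List Int) (par : Int) (i : Int) :
    ¬ (skipA A par i < (A.length : Int) ∧
       PySem.Int.mod (PySem.List.pyGetD A (skipA A par i) 0) 2 = par) := by
  fun_induction skipA with
  | case1 i h ih => exact ih
  | case2 i h => simpa [skipA, h] using h

-- termination measure of the outer loop and its decrease lemmas (cited in decreasing_by)
def loopMeas (A : List Int) (i val : Int) : Nat :=
  2 * (((A.length : Int) - i).toNat) +
    (if i < (A.length : Int) ∧
        PySem.Int.mod (PySem.List.pyGetD A i 0) 2 ≠ PySem.Int.mod val 2 then 1 else 0)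

theorem loopMeas_dec_found (A : List Int) (i val par : Int)
    (hi : i < (A.length : Int))
    (hj1 : skipA A par i < (A.length : Int))
    (hj2 : PySem.Int.mod (PySem.List.pyGetD A (skipA A par i) 0) 2 ≠ PySem.Int.mod val 2) :
    loopMeas A (skipA A par i) (PySem.List.pyGetD A (skipA A par i) 0) < loopMeas A i val := by
  unfold loopMeas
  have hge := skipA_ge A par i
  rcases lt_or_eq_of_le hge with hlt | heq
  · split <;> split <;> omega
  · have h1 : (if skipA A par i < (A.length : Int) ∧
        PySem.Int.mod (PySem.List.pyGetD A (skipA A par i) 0) 2 ≠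
          PySem.Int.mod (PySem.List.pyGetD A (skipA A par i) 0) 2
        then (1:Nat) else 0) = 0 := by simp
    have h2 : (if i < (A.length : Int) ∧
        PySem.Int.mod (PySem.List.pyGetD A i 0) 2 ≠ PySem.Int.mod val 2
        then (1:Nat) else 0) = 1 := by
      rw [if_pos ⟨hi, by rw [← heq] at hj2; exact hj2⟩]
    rw [h1, h2]; omega

theorem loopMeas_dec_end (A : List Int) (i val par : Int)
    (hi : i < (A.length : Int))
    (hend : ¬ skipA A par i < (A.length : Int)) :
    loopMeas A (skipA A par i) val < loopMeas A i val := by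
  unfold loopMeas
  have hge := skipA_ge A par i
  split <;> split <;> omega

theorem skipA_end_of_even (A : List Int) (i : Int)
    (hj : ¬ (skipA A 0 i < (A.length : Int) ∧
        PySem.Int.mod (PySem.List.pyGetD A (skipA A 0 i) 0) 2 = 1)) :
    ¬ skipA A 0 i < (A.length : Int) := by
  intro hlt
  have hmod := pvMod2 (PySem.List.pyGetD A (skipA A 0 i) 0)
  have hstop := skipA_stop A 0 i
  rcases hmod with hc | hc
  · exact hstop ⟨hlt, hc⟩
  · exact hj ⟨hlt, hc⟩

theorem skipA_end_of_odd (A : List Int) (i : Int)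
    (hj : ¬ (skipA A 1 i < (A.length : Int) ∧
        PySem.Int.mod (PySem.List.pyGetD A (skipA A 1 i) 0) 2 = 0)) :
    ¬ skipA A 1 i < (A.length : Int) := by
  intro hlt
  have hmod := pvMod2 (PySem.List.pyGetD A (skipA A 1 i) 0)
  have hstop := skipA_stop A 1 i
  rcases hmod with hc | hc
  · exact hj ⟨hlt, hc⟩
  · exact hstop ⟨hlt, hc⟩

-- outer 'while i < n: …' of A, state (ans, i, val)
def loopA (A : List Int) (ans : Int) (i : Int) (val : Int) : Int :=
  if hi : i < (A.length : Int) then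
    if hv : PySem.Int.mod val 2 = 0 then
      if hj : skipA A 0 i < (A.length : Int) ∧
          PySem.Int.mod (PySem.List.pyGetD A (skipA A 0 i) 0) 2 = 1 then
        loopA A (ans + 1) (skipA A 0 i) (PySem.List.pyGetD A (skipA A 0 i) 0)
      else
        loopA A ans (skipA A 0 i) val
    else
      if hj : skipA A 1 i < (A.length : Int) ∧
          PySem.Int.mod (PySem.List.pyGetD A (skipA A 1 i) 0) 2 = 0 then
        loopA A (ans + 1) (skipA A 1 i) (PySem.List.pyGetD A (skipA A 1 i) 0)
      else
        loopA A ans (skipA A 1 i) val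
  else ans
termination_by loopMeas A i val
decreasing_by
  · exact loopMeas_dec_found A i val 0 hi hj.1 (by rw [hj.2, hv]; omega)
  · exact loopMeas_dec_end A i val 0 hi (skipA_end_of_even A i hj)
  · have hvv := pvMod2 val
    exact loopMeas_dec_found A i val 1 hi hj.1 (by rw [hj.2]; omega)
  · exact loopMeas_dec_end A i val 1 hi (skipA_end_of_odd A i hj)

def solve (A : List Int) : Int :=
  loopA A 1 1 (PySem.List.pyGetD A 0 0)

-- ===== PORT B =====
def solve_alt (A : List Int) : Int :=
  1 + ((A.zip (PySem.List.slice A (some 1) none)).map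
        (fun p => if PySem.Int.mod p.1 2 ≠ PySem.Int.mod p.2 2 then (1 : Int) else 0)).sum

-- ===== PRECONDITION & SPEC =====
-- A reads the first element up front, so it raises IndexError on the empty list; Pre_ excludes exactly that.
def Pre_solve (A : List Int) : Prop := A ≠ []
instance (A : List Int) : Decidable (Pre_solve A) := by unfold Pre_solve; infer_instance
def pvWitness_solve : List Int := [3, 4, 4, 7]
def Spec_solve (A : List Int) (out : Int) : Prop := out = solve_alt A
instance (A : List Int) (out : Int) : Decidable (Spec_solve A out) := by unfold Spec_solve; infer_instance

-- ===== CLAIM (what is proved, stated in full; the proofs are below) =====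
def Claim_equal_solve : Prop := ∀ (A : List Int), Dom_solve A → Pre_solve A → Spec_solve A (solve A)

-- ===== LEMMAS AND PROOFS =====

-- number of adjacent parity changes
def chg : List Int → Int
  | x :: y :: rest =>
      (if PySem.Int.mod x 2 ≠ PySem.Int.mod y 2 then 1 else 0) + chg (y :: rest)
  | _ => 0

theorem chg_cons_cons (x y : Int) (l : List Int) :
    chg (x :: y :: l) = (if PySem.Int.mod x 2 ≠ PySem.Int.mod y 2 then 1 else 0) + chg (y :: l) := rfl

theorem chg_head_congr (x y : Int) (l : List Int)
    (h : PySem.Int.mod x 2 = PySem.Int.mod y 2) : chg (x :: l) = chg (y :: l) := by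
  cases l with
  | nil => rfl
  | cons a t => simp only [chg]; rw [h]

theorem chg_skip (A : List Int) (par : Int) (i : Int) (val : Int)
    (h0 : 0 ≤ i) (hv : PySem.Int.mod val 2 = par) :
    chg (val :: A.drop i.toNat) = chg (val :: A.drop (skipA A par i).toNat) := by
  fun_induction skipA with
  | case1 i h ih =>
    obtain ⟨hlt, hpar0⟩ := h
    have hlen : i.toNat < A.length := by omega
    have hone : (i + 1).toNat = i.toNat + 1 := by omega
    have hdrop : A.drop i.toNat = A[i.toNat] :: A.drop (i + 1).toNat := by
      rw [hone, List.drop_eq_getElem_cons hlen]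
    have hgetd : PySem.List.pyGetD A i 0 = A[i.toNat] :=
      PySem.List.pyGetD_eq_getElem A 0 h0 hlt
    have hpar : PySem.Int.mod A[i.toNat] 2 = PySem.Int.mod val 2 := by
      rw [← hgetd, hpar0, hv]
    rw [hdrop, ← ih (by omega), chg_cons_cons,
        chg_head_congr A[i.toNat] val _ hpar, if_neg (by rw [hpar]; simp)]
    ring
  | case2 i h => rfl

theorem skipA_nonneg (A : List Int) (par : Int) (i : Int) (h : 0 ≤ i) :
    0 ≤ skipA A par i := le_trans h (skipA_ge A par i)

theorem loopA_chg (A : List Int) (ans i val : Int) (h0 : 0 ≤ i) :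
    loopA A ans i val = ans + chg (val :: A.drop i.toNat) := by
  fun_induction loopA with
  | case1 ans i val hi hv hj ih =>
    -- even, change found
    obtain ⟨hjlt, hjm⟩ := hj
    have hjn : 0 ≤ skipA A 0 i := skipA_nonneg A 0 i h0
    have hlen : (skipA A 0 i).toNat < A.length := by omega
    have hone : (skipA A 0 i + 1).toNat = (skipA A 0 i).toNat + 1 := by omega
    have hdrop : A.drop (skipA A 0 i).toNat
        = A[(skipA A 0 i).toNat] :: A.drop (skipA A 0 i + 1).toNat := by
      rw [hone, List.drop_eq_getElem_cons hlen]
    have hgetd : PySem.List.pyGetD A (skipA A 0 i) 0 = A[(skipA A 0 i).toNat] :=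
      PySem.List.pyGetD_eq_getElem A 0 hjn hjlt
    have e1 : (if PySem.Int.mod A[(skipA A 0 i).toNat] 2 ≠ PySem.Int.mod A[(skipA A 0 i).toNat] 2
        then (1:Int) else 0) = 0 := by simp
    have e2 : (if PySem.Int.mod val 2 ≠ PySem.Int.mod A[(skipA A 0 i).toNat] 2
        then (1:Int) else 0) = 1 := by
      rw [if_pos (by rw [hv, ← hgetd, hjm]; omega)]
    rw [ih hjn, chg_skip A 0 i val h0 hv, hgetd, hdrop, chg_cons_cons, chg_cons_cons, e1, e2]
    ring
  | case2 ans i val hi hv hj ih =>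
    -- even, run to end
    have hjn : 0 ≤ skipA A 0 i := skipA_nonneg A 0 i h0
    rw [ih hjn, chg_skip A 0 i val h0 hv]
  | case3 ans i val hi hv hj ih =>
    -- odd, change found
    have hvv := pvMod2 val
    have hv1 : PySem.Int.mod val 2 = 1 := by omega
    obtain ⟨hjlt, hjm⟩ := hj
    have hjn : 0 ≤ skipA A 1 i := skipA_nonneg A 1 i h0
    have hlen : (skipA A 1 i).toNat < A.length := by omega
    have hone : (skipA A 1 i + 1).toNat = (skipA A 1 i).toNat + 1 := by omega
    have hdrop : A.drop (skipA A 1 i).toNat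
        = A[(skipA A 1 i).toNat] :: A.drop (skipA A 1 i + 1).toNat := by
      rw [hone, List.drop_eq_getElem_cons hlen]
    have hgetd : PySem.List.pyGetD A (skipA A 1 i) 0 = A[(skipA A 1 i).toNat] :=
      PySem.List.pyGetD_eq_getElem A 0 hjn hjlt
    have e1 : (if PySem.Int.mod A[(skipA A 1 i).toNat] 2 ≠ PySem.Int.mod A[(skipA A 1 i).toNat] 2
        then (1:Int) else 0) = 0 := by simp
    have e2 : (if PySem.Int.mod val 2 ≠ PySem.Int.mod A[(skipA A 1 i).toNat] 2
        then (1:Int) else 0) = 1 := by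
      rw [if_pos (by rw [hv1, ← hgetd, hjm]; omega)]
    rw [ih hjn, chg_skip A 1 i val h0 hv1, hgetd, hdrop, chg_cons_cons, chg_cons_cons, e1, e2]
    ring
  | case4 ans i val hi hv hj ih =>
    -- odd, run to end
    have hvv := pvMod2 val
    have hv1 : PySem.Int.mod val 2 = 1 := by omega
    have hjn : 0 ≤ skipA A 1 i := skipA_nonneg A 1 i h0
    rw [ih hjn, chg_skip A 1 i val h0 hv1]
  | case5 ans i val hi =>
    have hdrop : A.drop i.toNat = [] := by
      apply List.drop_eq_nil_of_le; omega
    rw [hdrop]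
    simp [chg]

theorem zip_sum_eq_chg (A : List Int) :
    ((A.zip A.tail).map
        (fun p => if PySem.Int.mod p.1 2 ≠ PySem.Int.mod p.2 2 then (1 : Int) else 0)).sum
      = chg A := by
  induction A with
  | nil => rfl
  | cons a t ih =>
    cases t with
    | nil => rfl
    | cons b r =>
      have ih' := ih
      simp only [List.tail_cons, List.zip_cons_cons, List.map_cons, List.sum_cons] at *
      rw [ih']
      simp [chg]

-- ===== VERDICT (by name: the statement is the Claim_ definition above) =====
theorem solve_spec : Claim_equal_solve := by
  intro A _ hpre
  unfold Spec_solve solve solve_alt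
  rw [PySem.List.slice_from_one, zip_sum_eq_chg]
  rw [loopA_chg A 1 1 (PySem.List.pyGetD A 0 0) (by omega)]
  cases A with
  | nil => exact absurd rfl hpre
  | cons a t =>
    have : PySem.List.pyGetD (a :: t) 0 0 = a := PySem.List.pyGetD_zero_cons a t 0
    rw [this]
    simp [Int.add_comm]
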